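-- pv_equiv track=rewrite | github.com/MartinaAstridRodda/dphil-thesis | adjnoun.py | _morph_to_set
-- ===== SOURCE A (Python) =====
-- ONE_LETTER_CODES = {
--     'masc': 'M',
--     'fem': 'F',
--     'neut': 'N',
--     'nom': 'N',
--     'gen': 'G',
--     'dat': 'D',
--     'acc': 'A',
--     'voc': 'V',
--     'sg': 'S',
--     'pl': 'P',
--     'dual': 'D'
-- }
--
-- def _morph_to_set(morph):
--     morphologies = {''}
--     for s in morph.split(' '):
--         new_morphologies = set()
--         for a in s.split('/'):
--             if a not in ONE_LETTER_CODES: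
--                 continue
--             new_morphologies |= {m + ONE_LETTER_CODES[a] for m in morphologies}
--         if new_morphologies:
--             morphologies = new_morphologies
--     return morphologies
-- ===== SOURCE B (Python) =====
-- ONE_LETTER_CODES = {
--     'masc': 'M',
--     'fem': 'F',
--     'neut': 'N',
--     'nom': 'N',
--     'gen': 'G',
--     'dat': 'D',
--     'acc': 'A',
--     'voc': 'V',
--     'sg': 'S',
--     'pl': 'P',
--     'dual': 'D'
-- }
--
-- def _morph_to_set(morph):
--     # Phase 1: for each space-separated group, the distinct mapped codes (in
--     # first-occurrence order); groups contributing no code are skipped.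
--     groups = []
--     for s in morph.split(' '):
--         codes = []
--         for a in s.split('/'):
--             c = ONE_LETTER_CODES.get(a)
--             if c is not None and c not in codes:
--                 codes.append(c)
--         if codes:
--             groups.append(codes)
--     # Phase 2: build the combinations back-to-front, prepending each group's
--     # codes to the suffixes already built.
--     out = ['']
--     for g in reversed(groups):
--         out = [c + suffix for suffix in out for c in g]
--     return set(out)
-- ===== Notes on version B (the rewrite author's own statement) =====
-- stated objective: alternative
-- what changed: A fuses filtering and combination into one accumulator loop that unions freshly mapped morphology-code sets group by group; B first builds a list of groups of distinct mapped codes (skipping groups with no valid code) and then forms all combinations in a separate pass that folds over the reversed group list, prepending codes to suffixes.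
import Mathlib
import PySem

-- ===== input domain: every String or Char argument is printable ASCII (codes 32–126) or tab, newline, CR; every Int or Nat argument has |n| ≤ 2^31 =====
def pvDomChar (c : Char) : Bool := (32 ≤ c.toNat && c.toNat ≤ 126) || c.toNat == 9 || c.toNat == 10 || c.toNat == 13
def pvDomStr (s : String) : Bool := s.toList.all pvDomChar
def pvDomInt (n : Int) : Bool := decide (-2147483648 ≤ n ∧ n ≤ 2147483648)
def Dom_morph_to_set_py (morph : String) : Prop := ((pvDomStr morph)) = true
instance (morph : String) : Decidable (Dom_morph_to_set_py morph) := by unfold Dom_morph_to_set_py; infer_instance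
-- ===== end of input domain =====

-- B replaces A's fused accumulator loop by a two-phase decomposition: first collect each
-- group's distinct mapped codes, then build the combinations back-to-front by prepending
-- (objective: alternative; same cost, no speed claim).

-- shared module-level constant ONE_LETTER_CODES
def pvCodes : PySem.Dict String String := PySem.Dict.ofList
  [("masc","M"),("fem","F"),("neut","N"),("nom","N"),("gen","G"),
   ("dat","D"),("acc","A"),("voc","V"),("sg","S"),("pl","P"),("dual","D")]

-- ===== PORT A =====
-- literal transliteration of A: morphologies is a Python set (PySem.Set); the separators
-- ' ' and '/' are nonempty literals, so .split(sep) is Str.split? … |>.getD [] (always some);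
-- 'if a not in ONE_LETTER_CODES: continue' + the lookup is the match on pvCodes.get? a
def morph_to_set_py (morph : String) : List String :=
  ((PySem.Str.split? morph " ").getD []).foldl
    (fun morphologies s =>
      let newM : PySem.Set String :=
        ((PySem.Str.split? s "/").getD []).foldl
          (fun acc a =>
            match pvCodes.get? a with
            | none => acc
            | some code => PySem.Set.union acc (morphologies.map (fun m => m ++ code)))
          PySem.Set.empty
      if newM.isEmpty then morphologies else newM)
    [""]

-- ===== PORT B =====
-- literal transliteration of B (Source B): phase 1 collects the groups of distinct mapped codes
-- (dict .get is the match on pvCodes.get? a), phase 2 folds over reversed(groups) prepending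
-- each code to the suffixes already built; final set(out) is PySem.Set.ofList
def morph_to_set_py_alt (morph : String) : List String :=
  let groups : List (List String) :=
    ((PySem.Str.split? morph " ").getD []).foldl
      (fun groups s =>
        let codes : List String :=
          ((PySem.Str.split? s "/").getD []).foldl
            (fun codes a =>
              match pvCodes.get? a with
              | some c => if codes.contains c then codes else codes ++ [c]
              | none => codes)
            []
        if codes.isEmpty then groups else groups ++ [codes])
      []
  let out : List String := groups.reverse.foldl
    (fun out g => out.flatMap (fun suffix => g.map (fun c => c ++ suffix))) [""]
  PySem.Set.ofList out

-- ===== PRECONDITION & SPEC =====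
def Spec_morph_to_set_py (morph : String) (out : List String) : Prop := out = morph_to_set_py_alt morph
instance (morph : String) (out : List String) : Decidable (Spec_morph_to_set_py morph out) := by unfold Spec_morph_to_set_py; infer_instance

-- ===== CLAIM (what is proved, stated in full; the proofs are below) =====
def Claim_equal_morph_to_set_py : Prop := ∀ (morph : String), Dom_morph_to_set_py morph → Spec_morph_to_set_py morph (morph_to_set_py morph)

-- ===== LEMMAS AND PROOFS =====

def pvF (M : List String) (g : List String) : List String :=
  g.flatMap (fun c => M.map (fun m => m ++ c))
def pvG (g : List String) (acc : List String) : List String :=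
  acc.flatMap (fun suffix => g.map (fun c => c ++ suffix))
def pvProdA (gs : List (List String)) : List String := gs.foldl pvF [""]
def pvProdB (gs : List (List String)) : List String := gs.foldr pvG [""]

lemma pvL1 (gs : List (List String)) (M : List String) :
    gs.foldl pvF M = (pvProdB gs).flatMap (fun s => M.map (fun m => m ++ s)) := by
  induction gs generalizing M with
  | nil => simp [pvProdB]
  | cons g gs ih =>
    show List.foldl pvF (pvF M g) gs = _
    rw [ih]
    simp only [pvProdB, List.foldr_cons]
    show _ = (pvG g (pvProdB gs)).flatMap (fun s => M.map (fun m => m ++ s))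
    simp [pvF, pvG, List.flatMap_map, List.map_flatMap, List.flatMap_assoc, List.map_map,
      Function.comp_def, String.append_assoc, pvProdB]

lemma pvProdA_eq_prodB (gs : List (List String)) : pvProdA gs = pvProdB gs := by
  rw [pvProdA, pvL1]
  simp

def pvGood (gs : List (List String)) : Prop :=
  ∀ g ∈ gs, g ≠ [] ∧ g.Nodup ∧ ∀ c ∈ g, c.toList.length = 1

lemma pvProdB_cons (g : List String) (gs : List (List String)) :
    pvProdB (g :: gs) = (pvProdB gs).flatMap (fun s => g.map (fun c => c ++ s)) := rfl

lemma pvProdB_ne_nil (gs : List (List String)) (h : pvGood gs) : pvProdB gs ≠ [] := by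
  induction gs with
  | nil => simp [pvProdB]
  | cons g gs ih =>
    have hg := h g (by simp)
    have hgs : pvGood gs := fun x hx => h x (by simp [hx])
    rw [pvProdB_cons]
    simp only [ne_eq, List.flatMap_eq_nil_iff]
    intro hall
    rcases List.exists_mem_of_ne_nil _ (ih hgs) with ⟨s, hs⟩
    have := hall s hs
    simp only [List.map_eq_nil_iff] at this
    exact hg.1 this

lemma pv_append_len (c s : String) (hc : c.toList.length = 1) :
    (c ++ s).toList.length = s.toList.length + 1 := by
  simp [hc]; omega

lemma pvProdB_len (gs : List (List String)) (h : pvGood gs) :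
    ∀ m ∈ pvProdB gs, m.toList.length = gs.length := by
  induction gs with
  | nil => intro m hm; simp [pvProdB] at hm; subst hm; decide
  | cons g gs ih =>
    intro m hm
    rw [pvProdB_cons] at hm
    simp only [List.mem_flatMap, List.mem_map] at hm
    rcases hm with ⟨s, hs, c, hc, rfl⟩
    have hgs : pvGood gs := fun x hx => h x (by simp [hx])
    have hg := h g (by simp)
    rw [pv_append_len c s (hg.2.2 c hc), ih hgs s hs]
    simp

lemma pv_append_inj (c s c' s' : String) (hcc' : c.toList.length = c'.toList.length)
    (h : c ++ s = c' ++ s') : c = c' ∧ s = s' := by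
  have ht : c.toList ++ s.toList = c'.toList ++ s'.toList := by
    have := congrArg String.toList h; simpa using this
  have := List.append_inj ht hcc'
  exact ⟨String.toList_injective this.1, String.toList_injective this.2⟩

lemma pvProdB_nodup (gs : List (List String)) (h : pvGood gs) : (pvProdB gs).Nodup := by
  induction gs with
  | nil => simp [pvProdB]
  | cons g gs ih =>
    have hgs : pvGood gs := fun x hx => h x (by simp [hx])
    have hg := h g (by simp)
    have hlen := pvProdB_len gs hgs
    rw [pvProdB_cons]
    rw [List.nodup_flatMap]
    constructor
    · intro s hs
      apply (hg.2.1).map_on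
      intro c hc c' hc' he
      exact (pv_append_inj c s c' s (by rw [hg.2.2 c hc, hg.2.2 c' hc']) he).1
    · have hnd := ih hgs
      refine List.Pairwise.imp_of_mem ?_ hnd
      intro s s' hsmem hs'mem hne
      simp only [Function.onFun, List.disjoint_left, List.mem_map]
      rintro x ⟨c, hc, rfl⟩ ⟨c', hc', he⟩
      have hl : s'.toList.length = s.toList.length := by
        rw [hlen s' hs'mem, hlen s hsmem]
      exact hne ((pv_append_inj c' s' c s (by rw [hg.2.2 c' hc', hg.2.2 c hc]) he).2).symm

set_option maxHeartbeats 2000000 in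
lemma pvCodes_eq : pvCodes = PySem.Dict.mk
    [("masc","M"),("fem","F"),("neut","N"),("nom","N"),("gen","G"),
     ("dat","D"),("acc","A"),("voc","V"),("sg","S"),("pl","P"),("dual","D")] := by
  decide

set_option maxHeartbeats 2000000 in
lemma pv_code_len1 (a c : String) (h : pvCodes.get? a = some c) : c.toList.length = 1 := by
  rw [pvCodes_eq] at h
  simp only [PySem.Dict.get?_mk_cons] at h
  split_ifs at h <;> first
    | (cases h; decide)
    | (simp [PySem.Dict.get?] at h)

def pvInnerA (M : List String) (acc : PySem.Set String) (as : List String) : PySem.Set String :=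
  as.foldl
    (fun acc a =>
      match pvCodes.get? a with
      | none => acc
      | some code => PySem.Set.union acc (M.map (fun m => m ++ code)))
    acc

def pvInnerB (cds : List String) (as : List String) : List String :=
  as.foldl
    (fun codes a =>
      match pvCodes.get? a with
      | some c => if codes.contains c then codes else codes ++ [c]
      | none => codes)
    cds

lemma pvInnerB_cons (cds : List String) (a : String) (as : List String) :
    pvInnerB cds (a :: as) = pvInnerB
      (match pvCodes.get? a with
       | some c => if cds.contains c then cds else cds ++ [c]
       | none => cds) as := rfl

lemma pvInnerA_cons (M : List String) (acc : PySem.Set String) (a : String) (as : List String) :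
    pvInnerA M acc (a :: as) = pvInnerA M
      (match pvCodes.get? a with
       | none => acc
       | some code => PySem.Set.union acc (M.map (fun m => m ++ code))) as := rfl

lemma pvInnerA_cons_none (M : List String) (acc : PySem.Set String) (a : String)
    (as : List String) (h : pvCodes.get? a = none) :
    pvInnerA M acc (a :: as) = pvInnerA M acc as := by
  rw [pvInnerA_cons, h]

lemma pvInnerA_cons_some (M : List String) (acc : PySem.Set String) (a code : String)
    (as : List String) (h : pvCodes.get? a = some code) :
    pvInnerA M acc (a :: as)
      = pvInnerA M (PySem.Set.union acc (M.map (fun m => m ++ code))) as := by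
  rw [pvInnerA_cons, h]

lemma pvInnerB_cons_none (cds : List String) (a : String) (as : List String)
    (h : pvCodes.get? a = none) : pvInnerB cds (a :: as) = pvInnerB cds as := by
  rw [pvInnerB_cons, h]

lemma pvInnerB_cons_some (cds : List String) (a code : String) (as : List String)
    (h : pvCodes.get? a = some code) :
    pvInnerB cds (a :: as) = pvInnerB (if cds.contains code then cds else cds ++ [code]) as := by
  rw [pvInnerB_cons, h]

lemma pvInnerB_good (as : List String) : ∀ (cds : List String), cds.Nodup →
    (∀ c ∈ cds, c.toList.length = 1) →
    (pvInnerB cds as).Nodup ∧ ∀ c ∈ pvInnerB cds as, c.toList.length = 1 := by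
  induction as with
  | nil => intro cds h1 h2; exact ⟨h1, h2⟩
  | cons a as ih =>
    intro cds h1 h2
    rcases hg : pvCodes.get? a with _ | c
    · rw [pvInnerB_cons_none cds a as hg]; exact ih cds h1 h2
    · rw [pvInnerB_cons_some cds a c as hg]
      by_cases hc : cds.contains c
      · simp only [hc, if_true]; exact ih cds h1 h2
      · have hnot : c ∉ cds := by simp_all
        simp only [hc, if_false, Bool.false_eq_true]
        apply ih
        · simp only [List.nodup_append, List.nodup_cons]
          exact ⟨h1, by simp, by intro x hx b hb; simp only [List.mem_singleton] at hb; subst hb; exact fun h => hnot (h ▸ hx)⟩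
        · intro x hx
          rcases List.mem_append.1 hx with h | h
          · exact h2 x h
          · simp only [List.mem_singleton] at h; subst h; exact pv_code_len1 a x hg

lemma pvInner_eq (n : Nat) (M : List String) (hM : M.Nodup)
    (hlen : ∀ m ∈ M, m.toList.length = n) (as : List String) :
    ∀ (cds : List String), cds.Nodup → (∀ c ∈ cds, c.toList.length = 1) →
    pvInnerA M (cds.flatMap (fun c => M.map (fun m => m ++ c))) as
      = (pvInnerB cds as).flatMap (fun c => M.map (fun m => m ++ c)) := by
  induction as with
  | nil => intro cds _ _; rfl
  | cons a as ih =>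
    intro cds h1 h2
    rcases hg : pvCodes.get? a with _ | code
    · rw [pvInnerA_cons_none _ _ _ _ hg, pvInnerB_cons_none _ _ _ hg]; exact ih cds h1 h2
    · rw [pvInnerA_cons_some _ _ _ _ _ hg, pvInnerB_cons_some _ _ _ _ hg]
      by_cases hc : cds.contains code
      · have hmem : code ∈ cds := by simpa [List.contains_iff_mem] using hc
        have hsub : ∀ y ∈ M.map (fun m => m ++ code),
            y ∈ cds.flatMap (fun c => M.map (fun m => m ++ c)) := by
          intro y hy
          simp only [List.mem_map] at hy
          rcases hy with ⟨m, hm, rfl⟩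
          exact List.mem_flatMap.2 ⟨code, hmem, List.mem_map.2 ⟨m, hm, rfl⟩⟩
        have hu : PySem.Set.union (cds.flatMap (fun c => M.map (fun m => m ++ c)))
            (M.map (fun m => m ++ code)) = cds.flatMap (fun c => M.map (fun m => m ++ c)) := by
          show PySem.Set.update _ _ = _
          rw [PySem.Set.update_eq_append_filter]
          have hfil : List.filter (fun y => !(PySem.Set.contains (cds.flatMap (fun c => M.map (fun m => m ++ c))) y))
              (PySem.Set.ofList (M.map (fun m => m ++ code))) = [] := by
            rw [List.filter_eq_nil_iff]
            intro y hy
            rw [PySem.Set.mem_ofList] at hy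
            have := hsub y hy
            simp [PySem.Set.contains, this]
          rw [hfil, List.append_nil]
        rw [hu, hc]
        simp only [reduceIte]
        exact ih cds h1 h2
      · have hcodelen := pv_code_len1 a code hg
        have hnotmem : code ∉ cds := by
          simp only [Bool.not_eq_true] at hc; simp_all
        have hnd : (M.map (fun m => m ++ code)).Nodup := by
          apply hM.map_on
          intro m hm m' hm' he
          exact (pv_append_inj m code m' code (by rw [hlen m hm, hlen m' hm']) he).1
        have hdisj : ∀ y ∈ M.map (fun m => m ++ code),
            y ∉ cds.flatMap (fun c => M.map (fun m => m ++ c)) := by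
          intro y hy hmem
          simp only [List.mem_map] at hy
          rcases hy with ⟨m, hm, rfl⟩
          simp only [List.mem_flatMap, List.mem_map] at hmem
          rcases hmem with ⟨c', hc', m', hm', he⟩
          have := pv_append_inj m' c' m code (by rw [hlen m' hm', hlen m hm]) he
          exact hnotmem (this.2 ▸ hc')
        have hu : PySem.Set.union (cds.flatMap (fun c => M.map (fun m => m ++ c)))
            (M.map (fun m => m ++ code))
            = (cds ++ [code]).flatMap (fun c => M.map (fun m => m ++ c)) := by
          show PySem.Set.update _ _ = _
          rw [PySem.Set.update_eq_append_of_disjoint _ _ hnd hdisj, List.flatMap_append]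
          simp
        have hcf : cds.contains code = false := by simpa using hc
        rw [hu, hcf]
        simp only [Bool.false_eq_true, reduceIte]
        apply ih
        · simp only [List.nodup_append, List.nodup_cons]
          exact ⟨h1, by simp, by intro x hx b hb; simp only [List.mem_singleton] at hb; subst hb; exact fun h => hnotmem (h ▸ hx)⟩
        · intro x hx
          rcases List.mem_append.1 hx with h | h
          · exact h2 x h
          · simp only [List.mem_singleton] at h; subst h; exact hcodelen

def pvOuterA (M : List String) (pieces : List String) : List String :=
  pieces.foldl
    (fun morphologies s =>
      let newM : PySem.Set String :=
        pvInnerA morphologies PySem.Set.empty ((PySem.Str.split? s "/").getD [])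
      if newM.isEmpty then morphologies else newM)
    M

def pvOuterB (gs : List (List String)) (pieces : List String) : List (List String) :=
  pieces.foldl
    (fun groups s =>
      let codes := pvInnerB [] ((PySem.Str.split? s "/").getD [])
      if codes.isEmpty then groups else groups ++ [codes])
    gs

lemma pvProdA_good_nodup (gs : List (List String)) (h : pvGood gs) : (pvProdA gs).Nodup := by
  rw [pvProdA_eq_prodB]; exact pvProdB_nodup gs h

lemma pvProdA_append_singleton (gs : List (List String)) (g : List String) :
    pvProdA (gs ++ [g]) = pvF (pvProdA gs) g := by
  simp [pvProdA, List.foldl_append]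

lemma pvOuter_eq (pieces : List String) : ∀ (gs : List (List String)), pvGood gs →
    pvOuterA (pvProdA gs) pieces = pvProdA (pvOuterB gs pieces)
      ∧ pvGood (pvOuterB gs pieces) := by
  induction pieces with
  | nil => intro gs h; exact ⟨rfl, h⟩
  | cons s ps ih =>
    intro gs hGood
    have hM : pvProdA gs = pvProdB gs := pvProdA_eq_prodB gs
    have hMnodup : (pvProdA gs).Nodup := pvProdA_good_nodup gs hGood
    have hMlen : ∀ m ∈ pvProdA gs, m.toList.length = gs.length := by
      rw [hM]; exact pvProdB_len gs hGood
    have hMne : pvProdA gs ≠ [] := by rw [hM]; exact pvProdB_ne_nil gs hGood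
    set as : List String := (PySem.Str.split? s "/").getD [] with has
    set cds : List String := pvInnerB [] as with hcds
    have hinner : pvInnerA (pvProdA gs) PySem.Set.empty as
        = cds.flatMap (fun c => (pvProdA gs).map (fun m => m ++ c)) := by
      have := pvInner_eq gs.length (pvProdA gs) hMnodup hMlen as [] (by simp) (by simp)
      simpa using this
    have hcgood := pvInnerB_good as [] (by simp) (by simp)
    show pvOuterA (if (pvInnerA (pvProdA gs) PySem.Set.empty as).isEmpty
        then pvProdA gs else pvInnerA (pvProdA gs) PySem.Set.empty as) ps
      = pvProdA (pvOuterB (if cds.isEmpty then gs else gs ++ [cds]) ps)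
      ∧ pvGood (pvOuterB (if cds.isEmpty then gs else gs ++ [cds]) ps)
    rw [hinner]
    by_cases hnil : cds = []
    · rw [hnil]
      simp only [List.flatMap_nil, List.isEmpty_nil, if_true]
      exact ih gs hGood
    · have hne : cds.flatMap (fun c => (pvProdA gs).map (fun m => m ++ c)) ≠ [] := by
        simp only [ne_eq, List.flatMap_eq_nil_iff]
        intro hall
        rcases List.exists_mem_of_ne_nil _ hnil with ⟨c, hc⟩
        have := hall c hc
        simp only [List.map_eq_nil_iff] at this
        exact hMne this
      rw [if_neg (by simpa [List.isEmpty_iff] using hne), if_neg (by simpa [List.isEmpty_iff] using hnil)]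
      have hstep : cds.flatMap (fun c => (pvProdA gs).map (fun m => m ++ c))
          = pvProdA (gs ++ [cds]) := by
        rw [pvProdA_append_singleton]; rfl
      rw [hstep]
      apply ih
      intro g hg
      rcases List.mem_append.1 hg with h | h
      · exact hGood g h
      · simp only [List.mem_singleton] at h; subst h
        exact ⟨hnil, hcgood.1, hcgood.2⟩

-- ===== VERDICT (by name: the statement is the Claim_ definition above) =====
theorem morph_to_set_py_spec : Claim_equal_morph_to_set_py := by
  intro morph _
  show morph_to_set_py morph = morph_to_set_py_alt morph
  have hps : pvGood ([] : List (List String)) := by intro g hg; simp at hg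
  obtain ⟨heq, hgood⟩ := pvOuter_eq ((PySem.Str.split? morph " ").getD []) [] hps
  have hA : morph_to_set_py morph
      = pvOuterA (pvProdA []) ((PySem.Str.split? morph " ").getD []) := rfl
  have hB : morph_to_set_py_alt morph
      = PySem.Set.ofList
          ((pvOuterB [] ((PySem.Str.split? morph " ").getD [])).reverse.foldl
            (fun out g => out.flatMap (fun suffix => g.map (fun c => c ++ suffix))) [""]) := rfl
  rw [hA, hB, List.foldl_reverse]
  have hfr : (pvOuterB [] ((PySem.Str.split? morph " ").getD [])).foldr
      (fun x y => y.flatMap (fun suffix => x.map (fun c => c ++ suffix))) [""]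
      = pvProdB (pvOuterB [] ((PySem.Str.split? morph " ").getD [])) := rfl
  rw [hfr, ← pvProdA_eq_prodB, ← heq,
    PySem.Set.ofList_eq_self_of_nodup _ (by rw [heq]; exact pvProdA_good_nodup _ hgood)]
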